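-- pv_equiv track=rewrite | github.com/AndrewSukhobok95/Diploma | funcs.py | time_line_creator
-- ===== SOURCE A (Python) =====
-- def time_line_creator(start_time, row_len):
--     time = [1,2,3,4]*(row_len//4)
--     t = 0
--     for q in range(len(time)):
--         str_q = str(start_time+t) + '_' + str(time[q])
--         if time[q] == 4:
--             t+=1
--         time[q] = str_q
--     return time
-- ===== SOURCE B (Python) =====
-- def time_line_creator(start_time, row_len):
--     res = []
--     for g in range(row_len // 4):
--         for v in (1, 2, 3, 4):
--             res.append(str(start_time + g) + '_' + str(v))
--     return res
-- ===== Notes on version B (the rewrite author's own statement) =====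
-- stated objective: simpler
-- what changed: Replaces A's pre-materialized [1,2,3,4]*(row_len//4) list mutated in place with a running time accumulator by a direct nested loop over (group, value) indices computing each label arithmetically.
import Mathlib
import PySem

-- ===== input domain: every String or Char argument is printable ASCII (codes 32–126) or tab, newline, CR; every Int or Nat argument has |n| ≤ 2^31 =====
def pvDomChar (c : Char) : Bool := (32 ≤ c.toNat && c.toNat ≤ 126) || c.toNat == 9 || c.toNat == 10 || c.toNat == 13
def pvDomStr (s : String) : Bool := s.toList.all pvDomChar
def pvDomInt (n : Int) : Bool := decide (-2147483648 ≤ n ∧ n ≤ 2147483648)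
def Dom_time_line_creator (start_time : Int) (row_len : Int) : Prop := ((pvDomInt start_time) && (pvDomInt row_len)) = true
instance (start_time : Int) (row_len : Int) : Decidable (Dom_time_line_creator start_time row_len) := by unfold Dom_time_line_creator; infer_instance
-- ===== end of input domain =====

-- B builds the labels with a nested (group, value) loop instead of A's flat scan over a
-- pre-built [1,2,3,4]*(row_len//4) list with a running accumulator; objective: simpler.

-- ===== PORT A =====
-- time = [1,2,3,4]*(row_len//4); then a scan with index q, mutating time[q] to its label
-- and bumping t after each 4; ported as a foldl over the elements carrying (labels so far, t).
def time_line_creator (start_time : Int) (row_len : Int) : List String :=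
  let time : List Int := (List.replicate (PySem.Int.floordiv row_len 4).toNat [1, 2, 3, 4]).flatten
  let r := time.foldl
    (fun (acc : List String × Int) x =>
      let str_q := PySem.Int.toStr (start_time + acc.2) ++ "_" ++ PySem.Int.toStr x
      (acc.1 ++ [str_q], if x = 4 then acc.2 + 1 else acc.2))
    ([], 0)
  r.1

-- ===== PORT B =====
-- for g in range(row_len // 4): for v in (1,2,3,4): append label
def time_line_creator_alt (start_time : Int) (row_len : Int) : List String :=
  (List.range (PySem.Int.floordiv row_len 4).toNat).flatMap
    (fun (g : Nat) => ([1, 2, 3, 4] : List Int).map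
      (fun v => PySem.Int.toStr (start_time + (g : Int)) ++ "_" ++ PySem.Int.toStr v))

-- ===== PRECONDITION & SPEC =====
def Spec_time_line_creator (start_time : Int) (row_len : Int) (out : List String) : Prop := out = time_line_creator_alt start_time row_len
instance (start_time : Int) (row_len : Int) (out : List String) : Decidable (Spec_time_line_creator start_time row_len out) := by unfold Spec_time_line_creator; infer_instance

-- ===== CLAIM (what is proved, stated in full; the proofs are below) =====
def Claim_equal_time_line_creator : Prop := ∀ (start_time : Int) (row_len : Int), Dom_time_line_creator start_time row_len → Spec_time_line_creator start_time row_len (time_line_creator start_time row_len)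

-- ===== LEMMAS AND PROOFS =====

-- A's fold over n copies of the block, started at counter t with prefix acc, produces
-- acc followed by B's n groups of labels based at start_time + t (and leaves t + n).
theorem tlc_fold_replicate (st : Int) (n : Nat) : ∀ (t : Int) (acc : List String),
    ((List.replicate n ([1, 2, 3, 4] : List Int)).flatten.foldl
      (fun (acc : List String × Int) x =>
        (acc.1 ++ [PySem.Int.toStr (st + acc.2) ++ "_" ++ PySem.Int.toStr x],
         if x = 4 then acc.2 + 1 else acc.2))
      (acc, t)).1
    = acc ++ (List.range n).flatMap
        (fun (g : Nat) => ([1, 2, 3, 4] : List Int).map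
          (fun v => PySem.Int.toStr (st + t + (g : Int)) ++ "_" ++ PySem.Int.toStr v)) := by
  induction n with
  | zero => simp
  | succ m ih =>
    intro t acc
    rw [List.replicate_succ, List.flatten_cons, List.foldl_append]
    simp only [List.foldl_cons, List.foldl_nil]
    simp only [if_neg (show ((1:Int) ≠ 4) by decide), if_neg (show ((2:Int) ≠ 4) by decide),
      if_neg (show ((3:Int) ≠ 4) by decide), if_true]
    rw [ih (t + 1) _]
    rw [List.range_succ_eq_map, List.flatMap_cons, List.flatMap_map]
    have hmap : List.flatMap
        (fun (g : Nat) => ([1, 2, 3, 4] : List Int).map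
          (fun v => PySem.Int.toStr (st + (t + 1) + (g : Int)) ++ "_" ++ PySem.Int.toStr v))
        (List.range m)
      = List.flatMap
        (fun (a : Nat) => ([1, 2, 3, 4] : List Int).map
          (fun v => PySem.Int.toStr (st + t + ((a.succ : Nat) : Int)) ++ "_" ++ PySem.Int.toStr v))
        (List.range m) := by
      refine List.flatMap_congr (fun g _ => ?_)
      have h : st + t + (((g.succ : Nat) : Int)) = st + (t + 1) + (g : Int) := by push_cast; ring
      rw [h]
    rw [hmap]
    simp [List.append_assoc]

-- ===== VERDICT (by name: the statement is the Claim_ definition above) =====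
theorem time_line_creator_spec : Claim_equal_time_line_creator := by
  intro st rl _
  show _ = _
  unfold time_line_creator time_line_creator_alt
  rw [tlc_fold_replicate st _ 0 []]
  simp
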